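-- pv_equiv track=rewrite | github.com/bighousevn/Rag_Graph_LawLaw | triplet_extractor_vi.py | descend_action_verb
-- ===== SOURCE A (Python) =====
-- from typing import Any, Dict, List, Optional, Sequence
--
-- ACTION_LINK_LABELS = {"xcomp", "ccomp", "vmod", "advcl", "iob", "iobj"}
--
-- def is_verb_pos(tag: str) -> bool:
--     upper = tag.upper()
--     return upper.startswith("V") or upper == "VERB"
--
-- def descend_action_verb(action_idx: int, dep: List[str], head: List[int], pos: List[str]) -> int:
--     if action_idx == -1:
--         return -1
--
--     current = action_idx
--     seen = set()
--     while current not in seen: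
--         seen.add(current)
--         children = [
--             i
--             for i, d in enumerate(dep, start=1)
--             if head[i - 1] == current and d.lower() in ACTION_LINK_LABELS and is_verb_pos(pos[i - 1])
--         ]
--         if not children:
--             break
--         right_side = [i for i in children if i > current]
--         current = right_side[0] if right_side else children[0]
--     return current
-- ===== SOURCE B (Python) =====
-- ACTION_LINK_LABELS = {"xcomp", "ccomp", "vmod", "advcl", "iob", "iobj"}
--
-- def is_verb_pos(tag):
--     upper = tag.upper()
--     return upper.startswith("V") or upper == "VERB"
--
-- def descend_action_verb(action_idx, dep, head, pos):
--     if action_idx == -1: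
--         return -1
--     # One pass: bucket the qualifying child indices (1-based) by their head.
--     buckets = {}
--     for i, d in enumerate(dep, start=1):
--         if d.lower() in ACTION_LINK_LABELS and is_verb_pos(pos[i - 1]):
--             buckets.setdefault(head[i - 1], []).append(i)
--
--     def nxt(c):
--         ch = buckets.get(c)
--         if not ch:
--             return None
--         for i in ch:
--             if i > c:
--                 return i
--         return ch[0]
--
--     # Follow the precomputed successor table until a dead end or a repeat.
--     current = action_idx
--     seen = set()
--     while current not in seen:
--         seen.add(current)
--         n = nxt(current)
--         if n is None:
--             break
--         current = n
--     return current
-- ===== Notes on version B (the rewrite author's own statement) =====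
-- stated objective: alternative
-- what changed: B replaces A's per-iteration rescan of all tokens (recomputing the qualifying-children list at every step of the walk) by a single bucketing pass that groups qualifying child indices by their head into a dict, after which the walk just follows the precomputed successor of the current node.
-- outside the precondition, e.g. on descend_action_verb(1, ['xcomp'], [5], []): A returns 1, B raises IndexError
import Mathlib
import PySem

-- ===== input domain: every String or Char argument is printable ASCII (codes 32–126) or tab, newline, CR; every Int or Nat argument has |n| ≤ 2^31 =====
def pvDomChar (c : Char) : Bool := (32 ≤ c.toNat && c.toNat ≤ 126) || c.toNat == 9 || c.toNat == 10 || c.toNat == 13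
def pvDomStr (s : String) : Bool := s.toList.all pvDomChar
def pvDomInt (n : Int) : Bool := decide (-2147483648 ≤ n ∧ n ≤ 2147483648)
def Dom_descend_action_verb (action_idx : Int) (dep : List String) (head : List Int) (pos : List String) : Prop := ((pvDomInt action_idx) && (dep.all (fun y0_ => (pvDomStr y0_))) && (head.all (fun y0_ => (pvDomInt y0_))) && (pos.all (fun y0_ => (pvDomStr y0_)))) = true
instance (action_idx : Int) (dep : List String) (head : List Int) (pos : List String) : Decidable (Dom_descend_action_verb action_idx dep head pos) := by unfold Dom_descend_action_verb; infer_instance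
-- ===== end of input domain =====

-- B replaces A's per-step rescan of all tokens by a single pass bucketing qualifying
-- child indices by their head, then follows the precomputed successor table (alternative
-- decomposition, same results; return value only — neither mutates its arguments).

-- ===== PORT A =====
def pvLabels : List String := ["xcomp", "ccomp", "vmod", "advcl", "iob", "iobj"]

def pvIsVerbPos (tag : String) : Bool :=
  let upper := PySem.Str.upper tag
  PySem.Str.startswith upper "V" || (upper == "VERB")

-- the children list A recomputes each iteration (enumerate(dep, start=1); head/pos reads
-- are total via pyGetD — in range on every input Pre_ admits)
def pvChildrenA (dep : List String) (head : List Int) (pos : List String) (current : Int) : List Int :=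
  ((List.range dep.length).filter (fun i0 =>
      (PySem.List.pyGetD head (i0 : Int) 0 == current)
      && pvLabels.contains (PySem.Str.lower (PySem.List.pyGetD dep (i0 : Int) ""))
      && pvIsVerbPos (PySem.List.pyGetD pos (i0 : Int) ""))).map (fun i0 => (i0 : Int) + 1)

-- A's while-loop; fuel dep.length + 2 bounds its iterations (seen grows each round and
-- every visited node is action_idx or one of 1..dep.length)
def pvLoopA (dep : List String) (head : List Int) (pos : List String) :
    Nat → Int → PySem.Set Int → Int
  | 0, current, _ => current
  | fuel + 1, current, seen =>
    if PySem.Set.contains seen current then current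
    else
      let seen' := PySem.Set.add seen current
      let children := pvChildrenA dep head pos current
      if children.isEmpty then current
      else
        let right := children.filter (fun i => decide (current < i))
        let cur' := match right.head? with
          | some i => i
          | none => children.headD current
        pvLoopA dep head pos fuel cur' seen'

def descend_action_verb (action_idx : Int) (dep : List String) (head : List Int) (pos : List String) : Int :=
  if action_idx == -1 then -1
  else pvLoopA dep head pos (dep.length + 2) action_idx PySem.Set.empty

-- ===== PORT B =====
-- one bucketing pass: qualifying child indices grouped by their head
def pvBuckets (dep : List String) (head : List Int) (pos : List String) : PySem.Dict Int (List Int) :=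
  (List.range dep.length).foldl (fun d i0 =>
    if pvLabels.contains (PySem.Str.lower (PySem.List.pyGetD dep (i0 : Int) ""))
       && pvIsVerbPos (PySem.List.pyGetD pos (i0 : Int) "") then
      PySem.Dict.modify d (PySem.List.pyGetD head (i0 : Int) 0) [] (fun ch => ch ++ [(i0 : Int) + 1])
    else d) PySem.Dict.empty

-- Source B's nxt: nearest bucket entry to the right, else the leftmost one
def pvNxt (buckets : PySem.Dict Int (List Int)) (c : Int) : Option Int :=
  match PySem.Dict.get? buckets c with
  | none => none
  | some ch =>
    if ch.isEmpty then none
    else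
      match ch.find? (fun i => decide (c < i)) with
      | some i => some i
      | none => ch.head?

def pvLoopB (buckets : PySem.Dict Int (List Int)) : Nat → Int → PySem.Set Int → Int
  | 0, current, _ => current
  | fuel + 1, current, seen =>
    if PySem.Set.contains seen current then current
    else
      let seen' := PySem.Set.add seen current
      match pvNxt buckets current with
      | none => current
      | some n => pvLoopB buckets fuel n seen'

def descend_action_verb_alt (action_idx : Int) (dep : List String) (head : List Int) (pos : List String) : Int :=
  if action_idx == -1 then -1
  else pvLoopB (pvBuckets dep head pos) (dep.length + 2) action_idx PySem.Set.empty

-- ===== PRECONDITION & SPEC =====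
-- Pre_ excludes inputs where head is shorter than dep or pos is too short to cover some
-- token whose dependency label is an action-link label: there the Python A raises
-- IndexError, except in traversal-dependent corner cases where A's short-circuit
-- evaluation skips the out-of-range pos read and still returns (see cites); B's single
-- bucket pass reads pos for every label-qualifying token and raises there.
def Pre_descend_action_verb (action_idx : Int) (dep : List String) (head : List Int) (pos : List String) : Prop :=
  action_idx = -1 ∨
    (dep.length ≤ head.length ∧
      ∀ i0 ∈ List.range dep.length, pos.length ≤ i0 →
        ¬ (["xcomp", "ccomp", "vmod", "advcl", "iob", "iobj"].contains
            (PySem.Str.lower (dep.getD i0 "")) = true))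
instance (action_idx : Int) (dep : List String) (head : List Int) (pos : List String) : Decidable (Pre_descend_action_verb action_idx dep head pos) := by unfold Pre_descend_action_verb; infer_instance

def pvWitness_descend_action_verb : Int × List String × List Int × List String :=
  (1, ["xcomp", "nsubj"], [1, 0], ["VERB", "N"])

def Spec_descend_action_verb (action_idx : Int) (dep : List String) (head : List Int) (pos : List String) (out : Int) : Prop := out = descend_action_verb_alt action_idx dep head pos
instance (action_idx : Int) (dep : List String) (head : List Int) (pos : List String) (out : Int) : Decidable (Spec_descend_action_verb action_idx dep head pos out) := by unfold Spec_descend_action_verb; infer_instance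

-- ===== CLAIM (what is proved, stated in full; the proofs are below) =====
def Claim_equal_descend_action_verb : Prop := ∀ (action_idx : Int) (dep : List String) (head : List Int) (pos : List String), Dom_descend_action_verb action_idx dep head pos → Pre_descend_action_verb action_idx dep head pos → Spec_descend_action_verb action_idx dep head pos (descend_action_verb action_idx dep head pos)

-- ===== LEMMAS AND PROOFS =====

-- the bucketing fold, read back through getD: bucket c collects exactly the matching indices
lemma pv_fold_getD (q : Int → Bool) (h : Int → Int) (f : Int → Int) :
    ∀ (l : List Int) (d : PySem.Dict Int (List Int)) (c : Int),
      (l.foldl (fun d i0 => if q i0 then PySem.Dict.modify d (h i0) [] (fun ch => ch ++ [f i0]) else d) d).getD c []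
        = d.getD c [] ++ (l.filter (fun i0 => q i0 && (h i0 == c))).map f := by
  intro l
  induction l with
  | nil => intro d c; simp
  | cons i0 l ih =>
    intro d c
    simp only [List.foldl_cons, List.filter_cons]
    cases hq : q i0 with
    | false => simp [ih]
    | true =>
      by_cases hc : h i0 = c
      · subst hc
        simp [ih, PySem.Dict.getD_modify_self]
      · have hne : (h i0 == c) = false := by simp [hc]
        simp [hne, ih, PySem.Dict.getD_modify_of_ne _ _ _ (Ne.symm hc)]

-- grouping: the bucket of c is exactly A's children list of c
lemma pv_buckets_getD (dep : List String) (head : List Int) (pos : List String) (c : Int) :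
    (pvBuckets dep head pos).getD c [] = pvChildrenA dep head pos c := by
  unfold pvBuckets pvChildrenA
  rw [pv_fold_getD]
  simp only [PySem.Dict.getD_empty, List.nil_append]
  congr 1
  apply List.filter_congr
  intro i0 _
  ac_rfl

-- per-node step: Source B's nxt computes A's per-iteration choice
lemma pv_nxt_spec (dep : List String) (head : List Int) (pos : List String) (c : Int) :
    pvNxt (pvBuckets dep head pos) c =
      (if (pvChildrenA dep head pos c).isEmpty then none
       else some (match ((pvChildrenA dep head pos c).filter (fun i => decide (c < i))).head? with
                  | some i => i
                  | none => (pvChildrenA dep head pos c).headD c)) := by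
  have hgd := pv_buckets_getD dep head pos c
  rw [PySem.Dict.getD_eq_get?_getD] at hgd
  unfold pvNxt
  cases hb : (pvBuckets dep head pos).get? c with
  | none =>
    rw [hb] at hgd
    simp at hgd
    simp [← hgd]
  | some ch =>
    rw [hb] at hgd
    simp at hgd
    rw [← hgd]
    cases ch with
    | nil => simp
    | cons x xs =>
      rw [List.head?_filter]
      cases hfind : (x :: xs).find? (fun i => decide (c < i)) with
      | none => simp [hfind]
      | some i => simp [hfind]

lemma pv_loop_eq (dep : List String) (head : List Int) (pos : List String) :
    ∀ (fuel : Nat) (current : Int) (seen : PySem.Set Int),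
      pvLoopA dep head pos fuel current seen = pvLoopB (pvBuckets dep head pos) fuel current seen := by
  intro fuel
  induction fuel with
  | zero => intro current seen; rfl
  | succ n ih =>
    intro current seen
    simp only [pvLoopA, pvLoopB, pv_nxt_spec]
    split
    · rfl
    · split
      · rfl
      · exact ih _ _

-- ===== VERDICT (by name: the statement is the Claim_ definition above) =====
theorem descend_action_verb_spec : Claim_equal_descend_action_verb := by
  intro action_idx dep head pos _ _
  unfold Spec_descend_action_verb descend_action_verb descend_action_verb_alt
  split
  · rfl
  · exact pv_loop_eq dep head pos _ _ _
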